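-- pv_equiv track=rewrite | github.com/alexandraback/datacollection | solutions_5630113748090880_1/Python/basaundi/main.py | solution
-- ===== SOURCE A (Python) =====
-- from collections import Counter
--
-- def solution(x):
--     counter = Counter()
--     for l in x:
--         for n in l:
--             counter[n] += 1
--
--     cand = []
--     for n, v in counter.items():
--         if v % 2 != 0:
--             cand.append(n)
--     cand.sort()
--     return " ".join(str(n) for n in cand)
-- ===== SOURCE B (Python) =====
-- def solution(x):
--     odd = set()
--     for l in x:
--         for n in l:
--             if n in odd:
--                 odd.discard(n)
--             else:
--                 odd.add(n)
--     return " ".join(str(n) for n in sorted(odd))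
-- ===== Notes on version B (the rewrite author's own statement) =====
-- stated objective: simpler
-- what changed: Replaces the Counter tally plus a separate odd-filtering pass by a single parity-toggling set (add if absent, discard if present), so no counts are kept and the filter loop disappears.
import Mathlib
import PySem

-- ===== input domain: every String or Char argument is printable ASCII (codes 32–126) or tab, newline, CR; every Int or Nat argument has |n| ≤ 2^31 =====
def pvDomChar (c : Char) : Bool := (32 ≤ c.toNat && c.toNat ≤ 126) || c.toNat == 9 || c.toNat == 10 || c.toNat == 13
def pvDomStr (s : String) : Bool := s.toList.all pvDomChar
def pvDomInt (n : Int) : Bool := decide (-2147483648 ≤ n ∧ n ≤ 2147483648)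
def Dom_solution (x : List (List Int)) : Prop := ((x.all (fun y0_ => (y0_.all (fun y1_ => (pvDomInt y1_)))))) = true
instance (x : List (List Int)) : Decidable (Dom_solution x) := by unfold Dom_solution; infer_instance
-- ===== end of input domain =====

-- B replaces the Counter tally + odd-filter pass by one parity-toggling set; objective: simpler.
-- ===== PORT A =====
def solution (x : List (List Int)) : String :=
  let counter : PySem.Dict Int Int :=
    x.foldl (fun d l => l.foldl (fun d n => d.modify n 0 (· + 1)) d) PySem.Dict.empty
  let cand : List Int :=
    counter.items.foldl (fun acc p => if PySem.Int.mod p.2 2 != 0 then acc ++ [p.1] else acc) []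
  let cand := PySem.List.sorted cand (fun n => n) false
  PySem.Str.join " " (cand.map PySem.Int.toStr)

-- ===== PORT B =====
def solution_alt (x : List (List Int)) : String :=
  let odd : PySem.Set Int :=
    x.foldl (fun s l => l.foldl
      (fun s n => if PySem.Set.contains s n then PySem.Set.discard s n else PySem.Set.add s n) s) PySem.Set.empty
  PySem.Str.join " " ((PySem.List.sorted odd (fun n => n) false).map PySem.Int.toStr)

-- ===== PRECONDITION & SPEC =====
def Spec_solution (x : List (List Int)) (out : String) : Prop := out = solution_alt x
instance (x : List (List Int)) (out : String) : Decidable (Spec_solution x out) := by unfold Spec_solution; infer_instance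

-- ===== CLAIM (what is proved, stated in full; the proofs are below) =====
def Claim_equal_solution : Prop := ∀ (x : List (List Int)), Dom_solution x → Spec_solution x (solution x)

-- ===== LEMMAS AND PROOFS =====

def pvToggle (s : List Int) (n : Int) : List Int :=
  if PySem.Set.contains s n then PySem.Set.discard s n else PySem.Set.add s n

theorem pvToggle_nodup (s : List Int) (hs : s.Nodup) (n : Int) : (pvToggle s n).Nodup := by
  unfold pvToggle
  split
  · exact PySem.Set.nodup_discard _ _ hs
  · exact PySem.Set.nodup_add _ _ hs

theorem pvFoldToggle_nodup (ys : List Int) (s : List Int) (hs : s.Nodup) :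
    (ys.foldl pvToggle s).Nodup := by
  induction ys generalizing s with
  | nil => exact hs
  | cons y ys ih => exact ih _ (pvToggle_nodup s hs y)

theorem pvToggle_mem (s : List Int) (n a : Int) :
    a ∈ pvToggle s n ↔ (if a = n then a ∉ s else a ∈ s) := by
  unfold pvToggle
  by_cases h : n ∈ s
  · rw [if_pos ((PySem.Set.contains_iff s n).mpr h), PySem.Set.mem_discard]
    by_cases han : a = n <;> simp [han, h]
  · rw [if_neg (by simp [h]), PySem.Set.mem_add]
    by_cases han : a = n <;> simp [han, h]

theorem pvFoldToggle_mem (ys : List Int) (s : List Int) (a : Int) :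
    a ∈ ys.foldl pvToggle s ↔ ((a ∈ s) ↔ ys.count a % 2 = 0) := by
  induction ys generalizing s with
  | nil => simp
  | cons y ys ih =>
    rw [List.foldl_cons, ih, pvToggle_mem]
    by_cases hay : a = y
    · subst hay
      simp only [List.count_cons_self]
      by_cases hp : a ∈ s <;> simp [hp] <;> omega
    · have hya : ¬ y = a := fun h => hay h.symm
      simp [hay, hya]

theorem pvOddBool (m : Nat) : ((PySem.Int.mod (m : Int) 2 != 0) = true) ↔ ¬ (m % 2 = 0) := by
  have h2 : (2 : Int) = ((2 : Nat) : Int) := rfl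
  rw [h2, PySem.Int.mod_natCast]
  simp [bne]
  omega

-- ===== VERDICT (by name: the statement is the Claim_ definition above) =====
theorem solution_spec : Claim_equal_solution := by
  intro x _
  unfold Spec_solution solution solution_alt
  simp only []
  set ys := x.flatten with hys
  have hA : x.foldl (fun d l => l.foldl (fun d n => d.modify n 0 (· + 1)) d) PySem.Dict.empty
      = PySem.Dict.counter ys := by
    rw [hys, ← List.foldl_flatten]
    exact (PySem.Dict.counter_eq_foldl _).symm
  have hB : x.foldl (fun s l => l.foldl
      (fun s n => if PySem.Set.contains s n then PySem.Set.discard s n else PySem.Set.add s n) s)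
      PySem.Set.empty = ys.foldl pvToggle PySem.Set.empty := by
    rw [hys, ← List.foldl_flatten]
    rfl
  rw [hA, hB]
  rw [PySem.List.foldl_append_if (fun p : Int × Int => PySem.Int.mod p.2 2 != 0) (fun p : Int × Int => p.1)]
  rw [PySem.Dict.items_counter, List.filter_map, List.map_map]
  have hcand : ((PySem.Set.ofList ys).filter
        ((fun p => PySem.Int.mod p.2 2 != 0) ∘ fun k => (k, (ys.count k : Int)))).map
        ((fun p : Int × Int => p.1) ∘ fun k => (k, (ys.count k : Int)))
      = (PySem.Set.ofList ys).filter (fun k => PySem.Int.mod ((ys.count k : Nat) : Int) 2 != 0) := by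
    simp [Function.comp_def, List.map_id']
  rw [List.nil_append, hcand]
  have hperm : ((PySem.Set.ofList ys).filter
      (fun k => PySem.Int.mod ((ys.count k : Nat) : Int) 2 != 0)).Perm
      (ys.foldl pvToggle PySem.Set.empty) := by
    rw [List.perm_ext_iff_of_nodup
      (PySem.Set.nodup_ofList ys |>.filter _)
      (pvFoldToggle_nodup ys PySem.Set.empty List.nodup_nil)]
    intro a
    rw [List.mem_filter, PySem.Set.mem_ofList, pvFoldToggle_mem]
    constructor
    · rintro ⟨_, hodd⟩
      have := (pvOddBool (ys.count a)).mp hodd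
      simp [PySem.Set.empty]
      omega
    · intro h
      simp [PySem.Set.empty] at h
      have hne : ¬ (ys.count a % 2 = 0) := by omega
      refine ⟨List.count_pos_iff.mp (by omega), (pvOddBool (ys.count a)).mpr hne⟩
  rw [PySem.List.sorted_eq_sorted_of_perm _ _ _ (fun a b h => h) hperm]
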